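-- pv_equiv track=rewrite | github.com/RTrentJones/BAMCP | src/bamcp/analysis/evidence.py | detect_homopolymer
-- ===== SOURCE A (Python) =====
-- def detect_homopolymer(seq: str, pos: int) -> int:
--     """Detect homopolymer run length at a given position.
--
--     Args:
--         seq: Reference sequence.
--         pos: Position within the sequence (0-indexed).
--
--     Returns:
--         Length of homopolymer run containing the position.
--     """
--     if not seq or pos < 0 or pos >= len(seq):
--         return 0
--
--     base = seq[pos].upper()
--     if base not in "ACGT":
--         return 0
--
--     length = 1
--
--     # Extend left
--     i = pos - 1
--     while i >= 0 and seq[i].upper() == base: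
--         length += 1
--         i -= 1
--
--     # Extend right
--     i = pos + 1
--     while i < len(seq) and seq[i].upper() == base:
--         length += 1
--         i += 1
--
--     return length
-- ===== SOURCE B (Python) =====
-- def detect_homopolymer(seq: str, pos: int) -> int:
--     """Single forward pass over the uppercased sequence: scan run boundaries,
--     returning the length of the run whose index interval contains pos."""
--     if not seq or pos < 0 or pos >= len(seq):
--         return 0
--     up = seq.upper()
--     if up[pos] not in "ACGT":
--         return 0
--     start = 0
--     for i in range(1, len(up)):
--         if up[i] != up[i - 1]:
--             if start <= pos < i:
--                 return i - start
--             start = i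
--     return len(up) - start
-- ===== Notes on version B (the rewrite author's own statement) =====
-- stated objective: alternative
-- what changed: A expands bidirectionally from pos with two while loops comparing each neighbour to the base; B uppercases the sequence once and makes a single forward pass over run boundaries, returning the length of the maximal run whose index interval contains pos.
import Mathlib
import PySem

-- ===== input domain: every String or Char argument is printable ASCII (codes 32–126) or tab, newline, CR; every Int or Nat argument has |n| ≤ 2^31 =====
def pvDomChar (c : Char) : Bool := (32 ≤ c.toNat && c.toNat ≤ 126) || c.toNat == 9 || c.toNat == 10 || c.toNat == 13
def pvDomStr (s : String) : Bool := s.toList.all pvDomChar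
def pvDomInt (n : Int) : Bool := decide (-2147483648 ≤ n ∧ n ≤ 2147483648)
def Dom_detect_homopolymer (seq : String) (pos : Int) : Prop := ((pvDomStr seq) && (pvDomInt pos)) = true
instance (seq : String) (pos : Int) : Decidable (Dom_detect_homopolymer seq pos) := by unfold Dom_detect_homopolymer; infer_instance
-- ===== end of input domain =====

-- B replaces A's bidirectional expansion from pos by one forward boundary scan over the
-- uppercased sequence (alternative decomposition; same exact return value).

-- ===== PORT A =====
-- while i >= 0 and seq[i].upper() == base: length += 1; i -= 1   (started at i = pos-1)
def aLeft (cs : List Char) (base : Char) : Nat → Nat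
  | 0 => 0
  | i + 1 => if PySem.Chars.upperChar (cs.getD i ' ') = base then aLeft cs base i + 1 else 0

-- while i < len(seq) and seq[i].upper() == base: length += 1; i += 1   (started at i = pos+1)
def aRight (cs : List Char) (base : Char) (i : Nat) : Nat :=
  if _h : i < cs.length then
    if PySem.Chars.upperChar (cs.getD i ' ') = base then aRight cs base (i + 1) + 1 else 0
  else 0
termination_by cs.length - i

def detect_homopolymer (seq : String) (pos : Int) : Int :=
  let cs := seq.toList
  if cs.length = 0 ∨ pos < 0 ∨ pos ≥ (cs.length : Int) then 0
  else
    let p := pos.toNat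
    let base := PySem.Chars.upperChar (cs.getD p ' ')
    if base ∈ "ACGT".toList then
      ((1 + aLeft cs base p + aRight cs base (p + 1) : Nat) : Int)
    else 0

-- ===== PORT B =====
-- for i in range(1, len(up)): if up[i] != up[i-1]: if start <= pos < i: return i - start; start = i
-- (with the early return ported as the recursion's base case)
def bLoop (up : List Char) (p : Nat) (i start : Nat) : Int :=
  if _h : i < up.length then
    if up.getD i ' ' ≠ up.getD (i - 1) ' ' then
      if start ≤ p ∧ p < i then ((i : Int) - (start : Int))
      else bLoop up p (i + 1) i
    else bLoop up p (i + 1) start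
  else ((up.length : Int) - (start : Int))
termination_by up.length - i

def detect_homopolymer_alt (seq : String) (pos : Int) : Int :=
  let cs := seq.toList
  if cs.length = 0 ∨ pos < 0 ∨ pos ≥ (cs.length : Int) then 0
  else
    let up := PySem.Chars.upper cs
    if up.getD pos.toNat ' ' ∈ "ACGT".toList then bLoop up pos.toNat 1 0
    else 0

-- ===== PRECONDITION & SPEC =====
def Spec_detect_homopolymer (seq : String) (pos : Int) (out : Int) : Prop := out = detect_homopolymer_alt seq pos
instance (seq : String) (pos : Int) (out : Int) : Decidable (Spec_detect_homopolymer seq pos out) := by unfold Spec_detect_homopolymer; infer_instance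

-- ===== CLAIM (what is proved, stated in full; the proofs are below) =====
def Claim_equal_detect_homopolymer : Prop := ∀ (seq : String) (pos : Int), Dom_detect_homopolymer seq pos → Spec_detect_homopolymer seq pos (detect_homopolymer seq pos)

-- ===== LEMMAS AND PROOFS =====

-- spec counters on the uppercased list
def leftS (up : List Char) (base : Char) : Nat → Nat
  | 0 => 0
  | i + 1 => if up.getD i ' ' = base then leftS up base i + 1 else 0

def rightS (up : List Char) (base : Char) (i : Nat) : Nat :=
  if _h : i < up.length then
    if up.getD i ' ' = base then rightS up base (i + 1) + 1 else 0
  else 0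
termination_by up.length - i

lemma gU (cs : List Char) (j : Nat) (h : j < cs.length) :
    (PySem.Chars.upper cs).getD j ' ' = PySem.Chars.upperChar (cs.getD j ' ') := by
  simp [PySem.Chars.upper, List.getD_eq_getElem?_getD, List.getElem?_eq_getElem h,
    List.getElem?_map]

lemma aLeft_eq_leftS (cs : List Char) (base : Char) :
    ∀ p, p ≤ cs.length → aLeft cs base p = leftS (PySem.Chars.upper cs) base p := by
  intro p
  induction p with
  | zero => intro _; rfl
  | succ j ih =>
    intro h
    rw [aLeft, leftS, gU cs j (by omega), ih (by omega)]

lemma aRight_eq_rightS (cs : List Char) (base : Char) (i : Nat) :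
    aRight cs base i = rightS (PySem.Chars.upper cs) base i := by
  rw [aRight, rightS]
  by_cases h : i < cs.length
  · have h' : i < (PySem.Chars.upper cs).length := by
      simpa [PySem.Chars.upper] using h
    rw [dif_pos h, dif_pos h', gU cs i h, aRight_eq_rightS cs base (i + 1)]
  · have h' : ¬ i < (PySem.Chars.upper cs).length := by
      simpa [PySem.Chars.upper] using h
    rw [dif_neg h, dif_neg h']
termination_by cs.length - i

lemma leftS_eq (up : List Char) (base : Char) :
    ∀ p start : Nat, start ≤ p →
      (∀ j, start ≤ j → j ≤ p → up.getD j ' ' = base) →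
      (start = 0 ∨ up.getD (start - 1) ' ' ≠ base) →
      leftS up base p = p - start := by
  intro p
  induction p with
  | zero => intro start h1 _ _; interval_cases start; rfl
  | succ j ih =>
    intro start h1 h2 h3
    rw [leftS]
    by_cases hs : start = j + 1
    · subst hs
      rcases h3 with h3 | h3
      · omega
      · simp only [Nat.add_sub_cancel] at h3
        rw [if_neg h3]; omega
    · have hsj : start ≤ j := by omega
      rw [if_pos (h2 j hsj (by omega)), ih start hsj (fun k hk1 hk2 => h2 k hk1 (by omega)) h3]
      omega

lemma rightS_eq (up : List Char) (base : Char) (i e : Nat)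
    (h1 : i ≤ e) (h2 : e ≤ up.length)
    (h3 : ∀ j, i ≤ j → j < e → up.getD j ' ' = base)
    (h4 : e = up.length ∨ up.getD e ' ' ≠ base) :
    rightS up base i = e - i := by
  rw [rightS]
  by_cases hi : i < up.length
  · rw [dif_pos hi]
    by_cases hie : i = e
    · subst hie
      rcases h4 with h4 | h4
      · omega
      · rw [if_neg h4]; omega
    · rw [if_pos (h3 i le_rfl (by omega)),
        rightS_eq up base (i + 1) e (by omega) h2 (fun j hj1 hj2 => h3 j (by omega) hj2) h4]
      omega
  · rw [dif_neg hi]; omega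
termination_by e - i

lemma bLoop_eq (up : List Char) (p i start : Nat)
    (hp : p < up.length)
    (h1 : start < i) (h2 : i ≤ up.length) (h3 : start ≤ p)
    (hrun : ∀ j, start ≤ j → j < i → up.getD j ' ' = up.getD start ' ')
    (hmax : start = 0 ∨ up.getD (start - 1) ' ' ≠ up.getD start ' ') :
    bLoop up p i start =
      ((1 + leftS up (up.getD p ' ') p + rightS up (up.getD p ' ') (p + 1) : Nat) : Int) := by
  rw [bLoop]
  by_cases hi : i < up.length
  · rw [dif_pos hi]
    by_cases hne : up.getD i ' ' ≠ up.getD (i - 1) ' '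
    · rw [if_pos hne]
      have hprev : up.getD (i - 1) ' ' = up.getD start ' ' := hrun (i - 1) (by omega) (by omega)
      by_cases hpi : p < i
      · rw [if_pos ⟨h3, hpi⟩]
        have hbase : up.getD p ' ' = up.getD start ' ' := hrun p h3 hpi
        have hl : leftS up (up.getD p ' ') p = p - start := by
          rw [hbase]
          exact leftS_eq up _ p start h3 (fun j hj1 hj2 => hrun j hj1 (by omega)) hmax
        have hr : rightS up (up.getD p ' ') (p + 1) = i - (p + 1) := by
          rw [hbase]
          refine rightS_eq up _ (p + 1) i (by omega) (by omega)
            (fun j hj1 hj2 => hrun j (by omega) hj2) (Or.inr ?_)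
          rw [← hprev]; exact hne
        rw [hl, hr]; omega
      · rw [if_neg (by omega)]
        rw [bLoop_eq up p (i + 1) i hp (by omega) (by omega) (by omega)
          (fun j hj1 hj2 => by simp [show j = i by omega])
          (Or.inr (by simpa using (Ne.symm hne)))]
    · rw [if_neg hne]
      push Not at hne
      rw [bLoop_eq up p (i + 1) start hp (by omega) (by omega) h3
        (fun j hj1 hj2 => by
          by_cases hji : j = i
          · subst hji; rw [hne]; exact hrun (j - 1) (by omega) (by omega)
          · exact hrun j hj1 (by omega))
        hmax]
  · rw [dif_neg hi]
    have hie : i = up.length := by omega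
    have hbase : up.getD p ' ' = up.getD start ' ' := hrun p h3 (by omega)
    have hl : leftS up (up.getD p ' ') p = p - start := by
      rw [hbase]
      exact leftS_eq up _ p start h3 (fun j hj1 hj2 => hrun j hj1 (by omega)) hmax
    have hr : rightS up (up.getD p ' ') (p + 1) = up.length - (p + 1) := by
      rw [hbase]
      exact rightS_eq up _ (p + 1) up.length (by omega) le_rfl
        (fun j hj1 hj2 => hrun j (by omega) (by omega)) (Or.inl rfl)
    rw [hl, hr]; omega
termination_by up.length - i

-- ===== VERDICT (by name: the statement is the Claim_ definition above) =====
theorem detect_homopolymer_spec : Claim_equal_detect_homopolymer := by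
  intro seq pos _
  unfold Spec_detect_homopolymer detect_homopolymer detect_homopolymer_alt
  set cs := seq.toList with hcs
  by_cases hg : cs.length = 0 ∨ pos < 0 ∨ pos ≥ (cs.length : Int)
  · simp only [hg, if_pos]
  · simp only [hg, if_neg, not_false_iff]
    have hp : pos.toNat < cs.length := by push Not at hg; omega
    have hlen : (PySem.Chars.upper cs).length = cs.length := by
      simp [PySem.Chars.upper]
    have hbase : (PySem.Chars.upper cs).getD pos.toNat ' '
        = PySem.Chars.upperChar (cs.getD pos.toNat ' ') := gU cs pos.toNat hp
    rw [hbase]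
    by_cases hm : PySem.Chars.upperChar (cs.getD pos.toNat ' ') ∈ "ACGT".toList
    · rw [if_pos hm, if_pos hm]
      rw [bLoop_eq (PySem.Chars.upper cs) pos.toNat 1 0 (by omega) (by omega) (by omega)
        (by omega) (fun j hj1 hj2 => by simp [show j = 0 by omega]) (Or.inl rfl)]
      rw [← hbase] at hm ⊢
      rw [hbase, aLeft_eq_leftS cs _ pos.toNat (by omega), aRight_eq_rightS cs _ (pos.toNat + 1),
        ← hbase]
    · rw [if_neg hm, if_neg hm]
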